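-- pv_equiv track=rewrite | github.com/27PIYUSH/Python3 | Recurssion/Recursion Asiignment/Pair Star.py | pair_star
-- ===== SOURCE A (Python) =====
-- def pair_star(str):
--     if len(str)==1:
--         return str
--     else:
--         if str[0]==str[1]:
--             return str[0]+ "*" +pair_star(str[1:])
--         else:
--             return str[0]+pair_star(str[1:])
-- ===== SOURCE B (Python) =====
-- def pair_star(str):
--     if len(str) == 1:
--         return str
--     out = str[0]
--     for i in range(1, len(str)):
--         if str[i] == str[i - 1]:
--             out += "*"
--         out += str[i]
--     return out
-- ===== Notes on version B (the rewrite author's own statement) =====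
-- stated objective: faster
-- what changed: Replaced the suffix recursion (n recursive frames, each rebuilding the remaining result by string concatenation) with a single forward iterative scan maintaining one string accumulator.
-- outside the precondition, e.g. on pair_star(''): A raises IndexError, B raises IndexError
import Mathlib
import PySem

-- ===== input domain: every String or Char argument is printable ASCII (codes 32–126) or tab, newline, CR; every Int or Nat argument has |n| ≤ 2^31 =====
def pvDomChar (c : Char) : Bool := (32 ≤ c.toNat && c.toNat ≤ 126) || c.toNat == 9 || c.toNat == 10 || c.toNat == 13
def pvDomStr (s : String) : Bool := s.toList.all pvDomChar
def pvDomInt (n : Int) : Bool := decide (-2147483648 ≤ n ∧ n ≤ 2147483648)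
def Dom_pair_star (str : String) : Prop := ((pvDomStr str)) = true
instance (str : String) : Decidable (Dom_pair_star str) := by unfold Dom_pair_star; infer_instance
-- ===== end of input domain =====

-- B replaces A's suffix recursion with a single forward iterative pass over the
-- characters, maintaining one string accumulator (objective: faster, measured).
-- Pre_ excludes the empty string, on which both A and B raise IndexError.


-- ===== PORT A =====
-- A's suffix recursion, transcribed over the character list
-- (the [] case is unreachable under Pre_: Python raises IndexError there).
def pairStarRec : List Char → List Char
  | [] => []
  | [c] => [c]
  | c1 :: c2 :: rest =>
      if c1 == c2 then c1 :: '*' :: pairStarRec (c2 :: rest)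
      else c1 :: pairStarRec (c2 :: rest)

def pair_star (str : String) : String := String.ofList (pairStarRec str.toList)

-- ===== PORT B =====
-- B's forward loop: state = (accumulator, previous character), one fold over the tail.
def pair_star_alt (str : String) : String :=
  match str.toList with
  | [] => ""        -- unreachable under Pre_: Python B raises IndexError on ""
  | c :: rest =>
      if rest = [] then str
      else
        String.ofList
          (rest.foldl
            (fun st x =>
              (st.1 ++ (if x == st.2 then ['*', x] else [x]), x))
            ([c], c)).1

-- ===== PRECONDITION & SPEC =====
-- Pre_ excludes the empty string, on which Python A raises IndexError (str[1]).
def Pre_pair_star (str : String) : Prop := str ≠ ""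
instance (str : String) : Decidable (Pre_pair_star str) := by unfold Pre_pair_star; infer_instance
def pvWitness_pair_star : String := "aab"
def Spec_pair_star (str : String) (out : String) : Prop := out = pair_star_alt str
instance (str : String) (out : String) : Decidable (Spec_pair_star str out) := by unfold Spec_pair_star; infer_instance

-- ===== CLAIM (what is proved, stated in full; the proofs are below) =====
def Claim_equal_pair_star : Prop := ∀ (str : String), Dom_pair_star str → Pre_pair_star str → Spec_pair_star str (pair_star str)

-- ===== LEMMAS AND PROOFS =====

-- proof-only helper: the characters B appends after the first one
def starsFrom : Char → List Char → List Char
  | _, [] => []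
  | prev, x :: xs => (if x == prev then ['*', x] else [x]) ++ starsFrom x xs

theorem foldl_starsFrom (rest : List Char) :
    ∀ (acc : List Char) (prev : Char),
      (rest.foldl (fun st x => (st.1 ++ (if x == st.2 then ['*', x] else [x]), x)) (acc, prev)).1
        = acc ++ starsFrom prev rest := by
  induction rest with
  | nil => intro acc prev; simp [starsFrom]
  | cons x xs ih =>
      intro acc prev
      simp only [List.foldl, starsFrom]
      rw [ih]
      simp

theorem pairStarRec_eq_starsFrom (rest : List Char) :
    ∀ (c : Char), pairStarRec (c :: rest) = c :: starsFrom c rest := by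
  induction rest with
  | nil => intro c; simp [pairStarRec, starsFrom]
  | cons x xs ih =>
      intro c
      simp only [pairStarRec, starsFrom, ih]
      by_cases h : c = x
      · simp [h]
      · simp [beq_iff_eq, h, Ne.symm h]

-- ===== VERDICT (by name: the statement is the Claim_ definition above) =====
theorem pair_star_spec : Claim_equal_pair_star := by
  intro str _ hpre
  unfold Spec_pair_star pair_star pair_star_alt
  cases hl : str.toList with
  | nil =>
      exact absurd (by rw [← String.ofList_toList (s := str), hl]) hpre
  | cons c rest =>
      cases rest with
      | nil =>
          simp only [↓reduceIte]
          rw [show str = String.ofList [c] from by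
            rw [← String.ofList_toList (s := str), hl]]
          simp [pairStarRec]
      | cons x xs =>
          simp only [reduceCtorEq, ↓reduceIte]
          rw [foldl_starsFrom, pairStarRec_eq_starsFrom]
          simp
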